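-- pv_equiv track=rewrite | github.com/PBialek1/dota_emb | v1/StratzMatchLaningDataFetcher.py | accumulate_per_second
-- ===== SOURCE A (Python) =====
-- def accumulate_per_second(values_per_minute: list[int], max_seconds: int) -> list[int]:
--     """
--     Convert a per-minute list (one entry per minute) into a cumulative
--     per-second list up to max_seconds.
--
--     STRATZ returns lastHitsPerMinute / deniesPerMinute / goldPerMinute /
--     experiencePerMinute as a list where index i holds the count for minute i
--     (0-indexed). We spread each minute's count evenly across its 60 seconds
--     to produce a per-second cumulative series.
--     """
--     if not values_per_minute:
--         return [0] * max_seconds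
--
--     cumulative = []
--     running_total = 0
--
--     for second in range(max_seconds):
--         minute_index = second // 60
--         second_in_minute = second % 60
--
--         if minute_index < len(values_per_minute):
--             minute_count = values_per_minute[minute_index]
--             if second_in_minute == 59:
--                 already_added = (minute_count * second_in_minute) // 60
--                 running_total += minute_count - already_added
--             else:
--                 running_total += (minute_count * (second_in_minute + 1)) // 60 - (
--                     minute_count * second_in_minute
--                 ) // 60
--
--         cumulative.append(running_total)
--
--     return cumulative
-- ===== SOURCE B (Python) =====
-- def accumulate_per_second(values_per_minute: list[int], max_seconds: int) -> list[int]: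
--     # Prefix sums + closed form per second: no running accumulator, no per-second
--     # delta bookkeeping; cumulative[s] = prefix[s//60] + (count*(s%60+1))//60.
--     prefix = [0]
--     acc = 0
--     for v in values_per_minute:
--         acc += v
--         prefix.append(acc)
--     n = len(values_per_minute)
--     total = prefix[n]
--     return [
--         prefix[s // 60] + (values_per_minute[s // 60] * (s % 60 + 1)) // 60
--         if s // 60 < n else total
--         for s in range(max_seconds)
--     ]
-- ===== Notes on version B (the rewrite author's own statement) =====
-- stated objective: simpler
-- what changed: Replaces the per-second running accumulator with per-delta floor-division bookkeeping and a special s%60==59 branch by a prefix-sum array plus one closed-form expression prefix[s//60] + (count*(s%60+1))//60 per second.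
import Mathlib
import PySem

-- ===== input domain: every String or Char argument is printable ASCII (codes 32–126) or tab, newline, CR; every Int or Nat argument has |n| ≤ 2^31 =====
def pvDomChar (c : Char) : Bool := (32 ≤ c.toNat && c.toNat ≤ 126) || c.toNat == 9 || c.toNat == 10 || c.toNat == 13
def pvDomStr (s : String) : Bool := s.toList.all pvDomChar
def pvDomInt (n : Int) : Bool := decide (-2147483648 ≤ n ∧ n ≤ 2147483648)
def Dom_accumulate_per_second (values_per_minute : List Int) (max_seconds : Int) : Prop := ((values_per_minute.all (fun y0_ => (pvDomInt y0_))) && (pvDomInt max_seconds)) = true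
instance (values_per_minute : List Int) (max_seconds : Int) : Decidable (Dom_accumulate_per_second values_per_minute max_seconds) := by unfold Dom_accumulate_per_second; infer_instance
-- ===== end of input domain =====

-- B replaces A's running accumulator and per-delta floor-division bookkeeping by a
-- prefix-sum array and one closed-form expression per second (objective: simpler).

-- ===== PORT A =====
def accumulate_per_second (values_per_minute : List Int) (max_seconds : Int) : List Int :=
  if values_per_minute = [] then PySem.List.pyRepeat [0] max_seconds
  else
    ((PySem.List.pyRange 0 max_seconds 1).foldl
      (fun (st : List Int × Int) (second : Int) =>
        let minute_index := PySem.Int.floordiv second 60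
        let second_in_minute := PySem.Int.mod second 60
        let running_total :=
          if minute_index < (values_per_minute.length : Int) then
            let minute_count := PySem.List.pyGetD values_per_minute minute_index 0
            if second_in_minute = 59 then
              st.2 + (minute_count - PySem.Int.floordiv (minute_count * second_in_minute) 60)
            else
              st.2 + (PySem.Int.floordiv (minute_count * (second_in_minute + 1)) 60 -
                        PySem.Int.floordiv (minute_count * second_in_minute) 60)
          else st.2
        (st.1 ++ [running_total], running_total))
      ([], 0)).1

-- ===== PORT B =====
def accumulate_per_second_alt (values_per_minute : List Int) (max_seconds : Int) : List Int :=
  let pfx := (values_per_minute.foldl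
      (fun (st : List Int × Int) (v : Int) => (st.1 ++ [st.2 + v], st.2 + v)) ([0], 0)).1
  let n : Int := values_per_minute.length
  let total := PySem.List.pyGetD pfx n 0
  (PySem.List.pyRange 0 max_seconds 1).map (fun s =>
    if PySem.Int.floordiv s 60 < n then
      PySem.List.pyGetD pfx (PySem.Int.floordiv s 60) 0 +
        PySem.Int.floordiv
          (PySem.List.pyGetD values_per_minute (PySem.Int.floordiv s 60) 0 *
            (PySem.Int.mod s 60 + 1)) 60
    else total)

-- ===== PRECONDITION & SPEC =====
def Spec_accumulate_per_second (values_per_minute : List Int) (max_seconds : Int) (out : List Int) : Prop := out = accumulate_per_second_alt values_per_minute max_seconds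
instance (values_per_minute : List Int) (max_seconds : Int) (out : List Int) : Decidable (Spec_accumulate_per_second values_per_minute max_seconds out) := by unfold Spec_accumulate_per_second; infer_instance

-- ===== CLAIM (what is proved, stated in full; the proofs are below) =====
def Claim_equal_accumulate_per_second : Prop := ∀ (values_per_minute : List Int) (max_seconds : Int), Dom_accumulate_per_second values_per_minute max_seconds → Spec_accumulate_per_second values_per_minute max_seconds (accumulate_per_second values_per_minute max_seconds)

-- ===== LEMMAS AND PROOFS =====

-- closed-form value of the cumulative series at second k (Nat index)
def pvG (v : List Int) (k : Nat) : Int :=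
  if k / 60 < v.length then
    (v.take (k / 60)).sum + (v.getD (k / 60) 0 * ((k % 60 : Nat) + 1)) / 60
  else (v.take v.length).sum

-- the prefix list B builds is the list of partial sums
theorem pv_pref_fold (v : List Int) (l : List Int) (a : Int) :
    v.foldl (fun (st : List Int × Int) (x : Int) => (st.1 ++ [st.2 + x], st.2 + x)) (l, a)
      = (l ++ (List.range v.length).map (fun i => a + (v.take (i + 1)).sum), a + v.sum) := by
  induction v generalizing l a with
  | nil => simp
  | cons x xs ih =>
    simp only [List.foldl_cons]
    rw [ih]
    simp [List.range_succ_eq_map, List.map_map, Function.comp_def, List.take_succ_cons,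
      List.append_assoc, add_assoc]

theorem pv_pref_get (v : List Int) (m : Nat) (hm : m ≤ v.length) :
    PySem.List.pyGetD
      ((v.foldl (fun (st : List Int × Int) (x : Int) => (st.1 ++ [st.2 + x], st.2 + x)) ([0], 0)).1)
      (m : Int) 0 = (v.take m).sum := by
  rw [pv_pref_fold]
  rw [PySem.List.pyGetD_natCast]
  cases m with
  | zero => simp
  | succ j =>
    have hj : j < v.length := by omega
    simp [List.getD, hj]

-- B equals the closed form pvG at every second
theorem pv_alt_eq (v : List Int) (ms : Int) :
    accumulate_per_second_alt v ms = (PySem.List.pyRange 0 ms 1).map (fun s => pvG v s.toNat) := by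
  unfold accumulate_per_second_alt
  apply List.map_congr_left
  intro s hs
  obtain ⟨h0, _⟩ := (PySem.List.mem_pyRange_one).1 hs
  obtain ⟨k, rfl⟩ : ∃ k : Nat, s = (k : Int) := ⟨s.toNat, (Int.toNat_of_nonneg h0).symm⟩
  have hfd : PySem.Int.floordiv (k : Int) 60 = ((k / 60 : Nat) : Int) := by
    exact_mod_cast PySem.Int.floordiv_natCast k 60
  have hmd : PySem.Int.mod (k : Int) 60 = ((k % 60 : Nat) : Int) := by
    exact_mod_cast PySem.Int.mod_natCast k 60
  rw [hfd, hmd]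
  simp only [Int.toNat_natCast, pvG]
  by_cases h : k / 60 < v.length
  · rw [if_pos (by exact_mod_cast h), if_pos h]
    rw [pv_pref_get v (k / 60) (le_of_lt h)]
    rw [PySem.List.pyGetD_natCast]
    rw [PySem.Int.floordiv_eq_ediv_of_pos (by norm_num)]
  · rw [if_neg (by exact_mod_cast h), if_neg h]
    rw [pv_pref_get v v.length le_rfl, List.take_length]

theorem pv_sum_take_succ (v : List Int) (m : Nat) (h : m < v.length) :
    (v.take (m + 1)).sum = (v.take m).sum + v.getD m 0 := by
  rw [List.getD_eq_getElem _ _ h, List.take_add_one, List.sum_append]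
  simp [List.getElem?_eq_getElem h]

theorem pv_mul60 (c : Int) : c * 60 / 60 = c :=
  Int.mul_ediv_cancel _ (by norm_num)

-- one step of A's running total, starting from the closed form at second k-1, gives it at k
theorem pv_step (v : List Int) (k : Nat) :
    (if ((k / 60 : Nat) : Int) < (v.length : Int) then
       if ((k % 60 : Nat) : Int) = 59 then
         (if k = 0 then (0:Int) else pvG v (k-1)) +
           (v.getD (k / 60) 0 - (v.getD (k / 60) 0 * ((k % 60 : Nat) : Int)) / 60)
       else
         (if k = 0 then (0:Int) else pvG v (k-1)) +
           ((v.getD (k / 60) 0 * (((k % 60 : Nat) : Int) + 1)) / 60 -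
             (v.getD (k / 60) 0 * ((k % 60 : Nat) : Int)) / 60)
     else (if k = 0 then (0:Int) else pvG v (k-1))) = pvG v k := by
  by_cases hk : k = 0
  · subst hk
    simp [pvG]
    by_cases h : 0 < v.length
    · simp [h]
    · have : v = [] := List.eq_nil_of_length_eq_zero (by omega)
      simp [this]
  · by_cases hr : k % 60 = 0
    · -- minute boundary: (k-1)%60 = 59, (k-1)/60 = k/60 - 1
      have h1 : (k - 1) % 60 = 59 := by omega
      have h2 : (k - 1) / 60 = k / 60 - 1 := by omega
      by_cases hm : k / 60 < v.length
      · have hm1 : k / 60 - 1 < v.length := by omega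
        rw [if_pos (by exact_mod_cast hm)]
        rw [if_neg (by simp [hr])]
        simp only [pvG, if_neg hk, h1, h2, if_pos hm, if_pos hm1, hr]
        have hs : (v.take (k / 60 - 1 + 1)).sum = (v.take (k / 60 - 1)).sum + v.getD (k / 60 - 1) 0 :=
          pv_sum_take_succ v _ hm1
        rw [show k / 60 - 1 + 1 = k / 60 by omega] at hs
        push_cast [hr]
        simp only [mul_one, mul_zero, Int.zero_ediv, pv_mul60, hs]
        ring
      · rw [if_neg (by exact_mod_cast hm)]
        simp only [pvG, if_neg hk, h1, h2, if_neg hm]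
        by_cases hm1 : k / 60 - 1 < v.length
        · -- k/60 = len exactly: crossing out of the data
          have hlen : k / 60 = v.length := by omega
          rw [if_pos hm1]
          have hs : (v.take (k / 60 - 1 + 1)).sum = (v.take (k / 60 - 1)).sum + v.getD (k / 60 - 1) 0 :=
            pv_sum_take_succ v _ hm1
          rw [show k / 60 - 1 + 1 = k / 60 by omega, hlen] at hs
          push_cast
          rw [hlen]
          simp only [pv_mul60]
          omega
        · rw [if_neg hm1]
    · -- inside a minute: (k-1)/60 = k/60, (k-1)%60 = k%60 - 1
      have h1 : (k - 1) % 60 = k % 60 - 1 := by omega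
      have h2 : (k - 1) / 60 = k / 60 := by omega
      have hc1 : ((k % 60 - 1 : Nat) : Int) + 1 = ((k % 60 : Nat) : Int) := by omega
      by_cases hm : k / 60 < v.length
      · rw [if_pos (by exact_mod_cast hm)]
        simp only [pvG, if_neg hk, h1, h2, if_pos hm, hc1]
        by_cases h59 : k % 60 = 59
        · rw [if_pos (by simp [h59]), h59]
          push_cast
          rw [pv_mul60]
          ring
        · rw [if_neg (fun h => h59 (by exact_mod_cast h))]
          generalize v.getD (k / 60) 0 * (((k % 60 : Nat) : Int) + 1) / 60 = B
          generalize v.getD (k / 60) 0 * ((k % 60 : Nat) : Int) / 60 = A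
          ring
      · rw [if_neg (by exact_mod_cast hm)]
        simp only [pvG, if_neg hk, h1, h2, if_neg hm]

-- A's fold produces pvG at every second, with the running total as second component
theorem pv_fold_eq (v : List Int) (k : Nat) :
    (PySem.List.pyRange 0 (k : Int) 1).foldl
      (fun (st : List Int × Int) (second : Int) =>
        let minute_index := PySem.Int.floordiv second 60
        let second_in_minute := PySem.Int.mod second 60
        let running_total :=
          if minute_index < (v.length : Int) then
            let minute_count := PySem.List.pyGetD v minute_index 0
            if second_in_minute = 59 then
              st.2 + (minute_count - PySem.Int.floordiv (minute_count * second_in_minute) 60)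
            else
              st.2 + (PySem.Int.floordiv (minute_count * (second_in_minute + 1)) 60 -
                        PySem.Int.floordiv (minute_count * second_in_minute) 60)
          else st.2
        (st.1 ++ [running_total], running_total))
      ([], 0)
    = ((PySem.List.pyRange 0 (k : Int) 1).map (fun s => pvG v s.toNat),
        if k = 0 then 0 else pvG v (k - 1)) := by
  induction k with
  | zero =>
    rw [show ((0:Nat):Int) = 0 from rfl, PySem.List.pyRange_one_eq_nil (by norm_num)]
    simp
  | succ k ih =>
    have hc : ((k + 1 : Nat) : Int) = (k : Int) + 1 := by push_cast; ring
    rw [hc, PySem.List.pyRange_one_succ_right (by positivity), List.foldl_append, List.map_append, ih]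
    have hfd : PySem.Int.floordiv (k : Int) 60 = ((k / 60 : Nat) : Int) := by
      exact_mod_cast PySem.Int.floordiv_natCast k 60
    have hmd : PySem.Int.mod (k : Int) 60 = ((k % 60 : Nat) : Int) := by
      exact_mod_cast PySem.Int.mod_natCast k 60
    simp only [List.foldl_cons, List.foldl_nil, List.map_cons, List.map_nil, hfd, hmd,
      PySem.List.pyGetD_natCast, Int.toNat_natCast, Nat.add_sub_cancel, Nat.succ_ne_zero, if_false]
    simp only [PySem.Int.floordiv_eq_ediv_of_pos (by norm_num : (0:Int) < 60)]
    rw [pv_step v k]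

-- ===== VERDICT (by name: the statement is the Claim_ definition above) =====
theorem accumulate_per_second_spec : Claim_equal_accumulate_per_second := by
  intro v ms _
  unfold Spec_accumulate_per_second
  rw [pv_alt_eq]
  unfold accumulate_per_second
  by_cases hv : v = []
  · subst hv
    rw [if_pos rfl, PySem.List.pyRepeat_singleton]
    have : ∀ s : Int, pvG [] s.toNat = 0 := by intro s; simp [pvG]
    simp only [this, List.map_const']
    rw [PySem.List.length_pyRange_one]
    simp
  · rw [if_neg hv]
    by_cases hms : ms ≤ 0
    · rw [PySem.List.pyRange_one_eq_nil hms]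
      simp
    · rw [show ms = ((ms.toNat : Nat) : Int) from (Int.toNat_of_nonneg (by omega)).symm, pv_fold_eq]
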